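-- pv_equiv track=rewrite | github.com/Siddhant-tec/pythonProject | divisibility_streak.py | streak
-- ===== SOURCE A (Python) =====
-- def streak(number):
--     count = 0
--     for num in range(1, 100):
--         if number % num == 0:
--             number += 1
--             count += 1
--         else:
--             break
--     return count
-- ===== SOURCE B (Python) =====
-- def _gcd(a, b):
--     while b:
--         a, b = b, a % b
--     return a
--
--
-- def streak(number):
--     # Test whether lcm(1..k) divides number-1, maintaining a running lcm.
--     d = number - 1
--     L = 1
--     count = 0
--     for k in range(1, 100):
--         L = L * k // _gcd(L, k)
--         if d % L == 0:
--             count += 1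
--         else:
--             break
--     return count
-- ===== Notes on version B (the rewrite author's own statement) =====
-- stated objective: alternative
-- what changed: Instead of mutating the dividend and testing divisibility of the incremented number by each successive num, B fixes d = number - one and maintains a running lcm L over k, testing whether L divides d each step.
import Mathlib
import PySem

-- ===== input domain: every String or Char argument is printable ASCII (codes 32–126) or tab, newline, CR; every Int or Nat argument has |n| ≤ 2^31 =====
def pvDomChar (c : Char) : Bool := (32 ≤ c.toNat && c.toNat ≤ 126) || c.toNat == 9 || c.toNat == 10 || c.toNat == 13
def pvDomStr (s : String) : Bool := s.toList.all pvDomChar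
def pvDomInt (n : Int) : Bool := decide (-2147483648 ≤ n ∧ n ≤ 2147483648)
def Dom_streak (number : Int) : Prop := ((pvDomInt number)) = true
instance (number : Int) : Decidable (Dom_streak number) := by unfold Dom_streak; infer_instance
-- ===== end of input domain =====

-- B replaces A's incrementing-dividend trick by testing whether a running lcm of 1..k divides number-1 (alternative decomposition).

-- ===== PORT A =====
-- the for-loop over range(1,100) with early break, carrying (number, count)
def streakLoop : List Int → Int → Int → Int
  | [], _, count => count
  | num :: rest, number, count =>
    if PySem.Int.mod number num = 0 then streakLoop rest (number + 1) (count + 1)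
    else count

def streak (number : Int) : Int :=
  streakLoop (PySem.List.pyRange 1 100 1) number 0

-- ===== PORT B =====
-- termination measure for the Euclidean loop in _gcd
theorem pymod_natAbs_lt (a b : Int) (hb : b ≠ 0) :
    (PySem.Int.mod a b).natAbs < b.natAbs := by
  rcases lt_or_gt_of_ne hb with h | h
  · have h1 := PySem.Int.mod_neg_bounds a h
    omega
  · have h1 := PySem.Int.mod_nonneg a h
    have h2 := PySem.Int.mod_lt a h
    omega

-- _gcd: while b: a, b = b, a % b
def gcdLoop (a b : Int) : Int :=
  if h : b = 0 then a else gcdLoop b (PySem.Int.mod a b)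
termination_by b.natAbs
decreasing_by exact pymod_natAbs_lt a b h

-- B's for-loop, carrying (d, L, count)
def streakAltLoop : List Int → Int → Int → Int → Int
  | [], _, _, count => count
  | k :: rest, d, L, count =>
    let L' := PySem.Int.floordiv (L * k) (gcdLoop L k)
    if PySem.Int.mod d L' = 0 then streakAltLoop rest d L' (count + 1)
    else count

def streak_alt (number : Int) : Int :=
  streakAltLoop (PySem.List.pyRange 1 100 1) (number - 1) 1 0

-- ===== PRECONDITION & SPEC =====
def Spec_streak (number : Int) (out : Int) : Prop := out = streak_alt number
instance (number : Int) (out : Int) : Decidable (Spec_streak number out) := by unfold Spec_streak; infer_instance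

-- ===== CLAIM (what is proved, stated in full; the proofs are below) =====
def Claim_equal_streak : Prop := ∀ (number : Int), Dom_streak number → Spec_streak number (streak number)

-- ===== LEMMAS AND PROOFS =====

-- gcdLoop computes Int.gcd on nonnegative inputs
theorem gcdLoop_eq (a b : Int) (ha : 0 ≤ a) (hb : 0 ≤ b) :
    gcdLoop a b = (Int.gcd a b : Int) := by
  by_cases h : b = 0
  · subst h
    rw [gcdLoop]
    simp [Int.gcd, Int.natAbs_of_nonneg ha]
  · have hbpos : 0 < b := lt_of_le_of_ne hb (Ne.symm h)
    rw [gcdLoop]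
    simp only [h, dite_false]
    have hmod : PySem.Int.mod a b = a % b := PySem.Int.mod_eq_emod_of_pos hbpos
    rw [hmod]
    have hrec : gcdLoop b (a % b) = (Int.gcd b (a % b) : Int) :=
      gcdLoop_eq b (a % b) hb (Int.emod_nonneg a h)
    rw [hrec]
    congr 1
    have habs : (a % b).natAbs = a.natAbs % b.natAbs := by
      rw [Int.natAbs_emod a h]
      simp [ha]
    rw [Int.gcd, Int.gcd, habs]
    rw [Nat.gcd_comm b.natAbs, ← Nat.gcd_rec b.natAbs a.natAbs]
    exact Nat.gcd_comm _ _
termination_by b.natAbs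
decreasing_by
  rw [← PySem.Int.mod_eq_emod_of_pos hbpos]
  exact pymod_natAbs_lt a b h

-- the lcm step: L * k // gcd(L, k) = lcm L k for positive L, k
theorem lcm_step (L k : Int) (hL : 0 < L) (hk : 0 < k) :
    PySem.Int.floordiv (L * k) (gcdLoop L k) = (Int.lcm L k : Int) := by
  rw [gcdLoop_eq L k hL.le hk.le]
  have hg : 0 < (Int.gcd L k : Int) := by
    have : Int.gcd L k ≠ 0 := by
      simp [Int.gcd_eq_zero_iff]
      omega
    exact_mod_cast Nat.pos_of_ne_zero this
  have hkey : L * k = (Int.gcd L k : Int) * (Int.lcm L k : Int) := by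
    have h1 : (Int.gcd L k : Int) * (Int.lcm L k : Int)
        = ((Int.gcd L k * Int.lcm L k : Nat) : Int) := by push_cast; ring
    rw [h1, Int.gcd_mul_lcm]
    push_cast [Int.natAbs_of_nonneg hL.le, Int.natAbs_of_nonneg hk.le]
    ring
  rw [PySem.Int.floordiv_eq_ediv_of_pos hg, hkey,
    Int.mul_ediv_cancel_left _ (ne_of_gt hg)]

-- main loop invariant: with number = d + a and L = a positive lcm dividing d,
-- the two loops agree on the range [a, b)
theorem loop_eq (n : Nat) : ∀ (a b d L c : Int), (b - a).toNat = n →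
    0 < a → 0 < L → L ∣ d →
    streakLoop (PySem.List.pyRange a b 1) (d + a) c =
    streakAltLoop (PySem.List.pyRange a b 1) d L c := by
  induction n with
  | zero =>
    intro a b d L c hn _ _ _
    rw [PySem.List.pyRange_one_eq_nil (by omega)]
    rfl
  | succ m ih =>
    intro a b d L c hn ha hL hLd
    rw [PySem.List.pyRange_one_cons (by omega)]
    simp only [streakLoop, streakAltLoop]
    have hg : PySem.Int.floordiv (L * a) (gcdLoop L a) = (Int.lcm L a : Int) :=
      lcm_step L a hL ha
    have hlcm_pos : 0 < (Int.lcm L a : Int) := by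
      have : Int.lcm L a ≠ 0 := fun hz => by
        rcases Int.lcm_eq_zero_iff.mp hz with h | h <;> omega
      exact_mod_cast Nat.pos_of_ne_zero this
    have hA : (PySem.Int.mod (d + a) a = 0) ↔ a ∣ d := by
      rw [PySem.Int.mod_eq_zero_iff_dvd]
      constructor
      · intro h; exact (Int.dvd_add_right (dvd_refl a)).mp (by rwa [add_comm])
      · intro h; exact Dvd.dvd.add h (dvd_refl a)
    have hB : (PySem.Int.mod d (Int.lcm L a : Int) = 0) ↔ a ∣ d := by
      rw [PySem.Int.mod_eq_zero_iff_dvd]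
      constructor
      · intro h; exact dvd_trans (Int.dvd_lcm_right L a) h
      · intro h
        rw [Int.coe_lcm]
        exact lcm_dvd hLd h
    by_cases hdvd : a ∣ d
    · rw [if_pos (hA.mpr hdvd), hg, if_pos (hB.mpr hdvd)]
      have : d + a + 1 = d + (a + 1) := by ring
      rw [this]
      exact ih (a + 1) b d (Int.lcm L a : Int) (c + 1) (by omega) (by omega)
        hlcm_pos (by rw [Int.coe_lcm]; exact lcm_dvd hLd hdvd)
    · rw [if_neg (fun h => hdvd (hA.mp h)), hg, if_neg (fun h => hdvd (hB.mp h))]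

-- ===== VERDICT (by name: the statement is the Claim_ definition above) =====
theorem streak_spec : Claim_equal_streak := by
  intro number _
  unfold Spec_streak streak streak_alt
  have h := loop_eq 99 1 100 (number - 1) 1 0 (by decide) (by decide) (by decide)
    (one_dvd _)
  simpa using h
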